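-- pv_equiv track=rewrite | github.com/tokafor1/personal-projects- | tactego-game/tactego.py | is_victory
-- ===== SOURCE A (Python) =====
-- def is_victory(board):
--     red_flags = sum(cell[1:] == 'F' for row in board for cell in row if cell.startswith('R'))
--     blue_flags = sum(cell[1:] == 'F' for row in board for cell in row if cell.startswith('B'))
--
--     if red_flags == 0:
--         return 'Blue'
--     elif blue_flags == 0:
--         return 'Red'
--     else:
--         return None
-- ===== SOURCE B (Python) =====
-- def is_victory(board):
--     cells = set()
--     for row in board:
--         cells.update(row)
--     if 'RF' not in cells:
--         return 'Blue'
--     if 'BF' not in cells: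
--         return 'Red'
--     return None
-- ===== Notes on version B (the rewrite author's own statement) =====
-- stated objective: alternative
-- what changed: Replaces A's two predicate-counting passes (startswith + slicing per cell) by building a set of the distinct cell strings once and deciding the winner by two whole-string membership lookups of the literals 'RF' and 'BF', which A's per-cell predicate provably characterises.
import Mathlib
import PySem

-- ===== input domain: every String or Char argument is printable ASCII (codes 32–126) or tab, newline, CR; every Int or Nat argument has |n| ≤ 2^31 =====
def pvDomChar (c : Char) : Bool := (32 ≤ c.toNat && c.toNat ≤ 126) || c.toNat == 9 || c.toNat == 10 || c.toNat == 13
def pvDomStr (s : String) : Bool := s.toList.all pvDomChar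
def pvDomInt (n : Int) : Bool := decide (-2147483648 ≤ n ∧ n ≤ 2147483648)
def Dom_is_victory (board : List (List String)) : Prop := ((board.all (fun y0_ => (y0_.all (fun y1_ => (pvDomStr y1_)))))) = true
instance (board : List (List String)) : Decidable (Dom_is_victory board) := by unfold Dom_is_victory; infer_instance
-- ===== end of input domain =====

-- B builds the set of distinct cell strings once and decides by membership of the literals "RF"/"BF" (objective: alternative).

-- ===== PORT A =====
-- A: two generator-expression sums (red_flags, blue_flags), then a branch on the counts.
def is_victory (board : List (List String)) : Option String :=
  let red_flags : Int := board.foldl (fun acc row => row.foldl (fun a cell =>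
    if PySem.Str.startswith cell "R" then a + (if PySem.Str.slice cell (some 1) none = "F" then 1 else 0) else a) acc) 0
  let blue_flags : Int := board.foldl (fun acc row => row.foldl (fun a cell =>
    if PySem.Str.startswith cell "B" then a + (if PySem.Str.slice cell (some 1) none = "F" then 1 else 0) else a) acc) 0
  if red_flags = 0 then some "Blue"
  else if blue_flags = 0 then some "Red"
  else none

-- ===== PORT B =====
-- B: build the set of all cells (cells.update(row) per row), then two membership lookups.
def is_victory_alt (board : List (List String)) : Option String :=
  let cells : PySem.Set String := board.foldl (fun s row => PySem.Set.update s row) PySem.Set.empty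
  if !(PySem.Set.contains cells "RF") then some "Blue"
  else if !(PySem.Set.contains cells "BF") then some "Red"
  else none

-- ===== PRECONDITION & SPEC =====
def Spec_is_victory (board : List (List String)) (out : Option String) : Prop := out = is_victory_alt board
instance (board : List (List String)) (out : Option String) : Decidable (Spec_is_victory board out) := by unfold Spec_is_victory; infer_instance

-- ===== CLAIM (what is proved, stated in full; the proofs are below) =====
def Claim_equal_is_victory : Prop := ∀ (board : List (List String)), Dom_is_victory board → Spec_is_victory board (is_victory board)

-- ===== LEMMAS AND PROOFS =====

-- A's per-cell test "startswith [a] and cell[1:] == [f]" is exactly equality with the two-char string [a, f].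
theorem pv_chars_startswith_false (a c : Char) (t : List Char) (hc : ¬ c = a) :
    PySem.Chars.startswith (c :: t) [a] = false := by
  rw [Bool.eq_false_iff]
  intro h
  rw [PySem.Chars.startswith_iff] at h
  rcases List.prefix_cons_iff.mp h with h1 | ⟨_, ⟨⟨h1, _⟩, _⟩⟩ <;> simp_all

theorem pv_chars_cell (a f : Char) (cs : List Char) :
    (PySem.Chars.startswith cs [a] && (cs.tail == [f])) = (cs == [a, f]) := by
  cases cs with
  | nil => simp [PySem.Chars.startswith]
  | cons c t =>
    by_cases hc : c = a
    · subst hc; simp [PySem.Chars.startswith_iff]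
    · simp [pv_chars_startswith_false a c t hc, hc]

theorem pv_str_beq (x y : String) : (x == y) = (x.toList == y.toList) := by
  by_cases hxy : x = y
  · subst hxy; simp
  · have h2 : x.toList ≠ y.toList := fun h => hxy (String.toList_inj.mp h)
    simp [hxy, h2]

theorem pv_slice_tail (x : String) : (PySem.Str.slice x (some 1) none).toList = x.toList.tail := by
  simp [PySem.Str.toList_slice, PySem.List.slice_from_one]

theorem pv_cell_R (x : String) :
    (PySem.Str.startswith x "R" && (PySem.Str.slice x (some 1) none == "F")) = (x == "RF") := by
  rw [pv_str_beq (PySem.Str.slice x (some 1) none) "F", pv_str_beq x "RF",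
      pv_slice_tail, (by simp [PySem.Str.startswith_eq] :
        PySem.Str.startswith x "R" = PySem.Chars.startswith x.toList ['R']),
      (by decide : ("F" : String).toList = ['F']), (by decide : ("RF" : String).toList = ['R','F'])]
  exact pv_chars_cell 'R' 'F' x.toList

theorem pv_cell_B (x : String) :
    (PySem.Str.startswith x "B" && (PySem.Str.slice x (some 1) none == "F")) = (x == "BF") := by
  rw [pv_str_beq (PySem.Str.slice x (some 1) none) "F", pv_str_beq x "BF",
      pv_slice_tail, (by simp [PySem.Str.startswith_eq] :
        PySem.Str.startswith x "B" = PySem.Chars.startswith x.toList ['B']),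
      (by decide : ("F" : String).toList = ['F']), (by decide : ("BF" : String).toList = ['B','F'])]
  exact pv_chars_cell 'B' 'F' x.toList

-- A's inner counting fold is a countP of the equality predicate.
theorem pv_count_fold (p w : String) (xs : List String) (acc : Int)
    (hw : ∀ x : String, (PySem.Str.startswith x p && (PySem.Str.slice x (some 1) none == "F")) = (x == w)) :
    xs.foldl (fun a cell =>
      if PySem.Str.startswith cell p then a + (if PySem.Str.slice cell (some 1) none = "F" then 1 else 0) else a) acc
      = acc + (xs.countP (· == w) : Int) := by
  induction xs generalizing acc with
  | nil => simp
  | cons x xs ih =>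
    rw [List.foldl_cons, ih, List.countP_cons]
    have hx := hw x
    by_cases hxw : (x == w) = true
    · rw [if_pos hxw]
      rw [hxw] at hx
      have h1 : PySem.Str.startswith x p = true := by
        rcases Bool.and_eq_true_iff.mp hx with ⟨h1, _⟩; exact h1
      have h2 : PySem.Str.slice x (some 1) none = "F" := by
        rcases Bool.and_eq_true_iff.mp hx with ⟨_, h2⟩; exact beq_iff_eq.mp h2
      rw [if_pos h1, if_pos h2]
      push_cast; ring
    · rw [if_neg hxw]
      rw [Bool.eq_false_iff.mpr hxw] at hx
      by_cases h1 : PySem.Str.startswith x p = true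
      · have h2 : ¬ PySem.Str.slice x (some 1) none = "F" := by
          intro h2
          rw [h1, beq_iff_eq.mpr h2] at hx
          simp at hx
        rw [if_pos h1, if_neg h2]
        push_cast; ring
      · rw [if_neg h1]
        push_cast; ring

theorem pv_fold_flatten {α β : Type} (f : β → α → β) (board : List (List α)) (z : β) :
    board.foldl (fun acc row => row.foldl f acc) z = board.flatten.foldl f z := by
  induction board generalizing z with
  | nil => rfl
  | cons r rs ih => simp [List.foldl_cons, ih]

-- B's row-by-row set build is Set.update of the flattened board.
theorem pv_set_fold (board : List (List String)) (s : PySem.Set String) :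
    board.foldl (fun s row => PySem.Set.update s row) s = PySem.Set.update s board.flatten := by
  induction board generalizing s with
  | nil => rfl
  | cons r rs ih =>
    rw [List.foldl_cons, ih, List.flatten_cons]
    show PySem.Set.update (PySem.Set.update s r) rs.flatten = _
    unfold PySem.Set.update
    rw [List.foldl_append]

theorem pv_count_zero_iff (w : String) (xs : List String) :
    ((xs.countP (· == w) : Int) = 0) ↔ w ∉ xs := by
  rw [Int.natCast_eq_zero, List.countP_eq_zero]
  constructor
  · intro h hm; exact absurd (by simp : (w == w) = true) (by simpa using h w hm)
  · intro h x hx he; exact h (beq_iff_eq.mp he ▸ hx)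

theorem pv_contains_iff (s : PySem.Set String) (x : String) :
    PySem.Set.contains s x = true ↔ x ∈ s := by
  simp [PySem.Set.contains]

theorem is_victory_eq_alt (board : List (List String)) :
    is_victory board = is_victory_alt board := by
  unfold is_victory is_victory_alt
  rw [pv_fold_flatten, pv_fold_flatten,
      pv_count_fold "R" "RF" board.flatten 0 pv_cell_R,
      pv_count_fold "B" "BF" board.flatten 0 pv_cell_B,
      pv_set_fold board PySem.Set.empty]
  have hmem : ∀ x : String, x ∈ PySem.Set.update PySem.Set.empty board.flatten ↔ x ∈ board.flatten := by
    intro x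
    rw [PySem.Set.mem_update]
    constructor
    · rintro (h | h)
      · exact absurd (show x ∈ ([] : List String) from h) (by simp)
      · exact h
    · exact Or.inr
  simp only [zero_add]
  by_cases hRf : "RF" ∈ board.flatten
  · have h1 : ¬ ((board.flatten.countP (· == "RF") : Int) = 0) := by
      rw [pv_count_zero_iff]; simpa using hRf
    have h2 : PySem.Set.contains (PySem.Set.update PySem.Set.empty board.flatten) "RF" = true := by
      rw [pv_contains_iff, hmem]; exact hRf
    rw [if_neg h1, h2]
    by_cases hBf : "BF" ∈ board.flatten
    · have h3 : ¬ ((board.flatten.countP (· == "BF") : Int) = 0) := by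
        rw [pv_count_zero_iff]; simpa using hBf
      have h4 : PySem.Set.contains (PySem.Set.update PySem.Set.empty board.flatten) "BF" = true := by
        rw [pv_contains_iff, hmem]; exact hBf
      rw [if_neg h3, h4]; simp
    · have h3 : (board.flatten.countP (· == "BF") : Int) = 0 := by
        rw [pv_count_zero_iff]; exact hBf
      have h4 : PySem.Set.contains (PySem.Set.update PySem.Set.empty board.flatten) "BF" = false := by
        rw [Bool.eq_false_iff]; intro hc; exact hBf ((hmem "BF").mp ((pv_contains_iff _ _).mp hc))
      rw [if_pos h3, h4]; simp
  · have h1 : (board.flatten.countP (· == "RF") : Int) = 0 := by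
      rw [pv_count_zero_iff]; exact hRf
    have h2 : PySem.Set.contains (PySem.Set.update PySem.Set.empty board.flatten) "RF" = false := by
      rw [Bool.eq_false_iff]; intro hc; exact hRf ((hmem "RF").mp ((pv_contains_iff _ _).mp hc))
    rw [if_pos h1, h2]; simp

-- ===== VERDICT (by name: the statement is the Claim_ definition above) =====
theorem is_victory_spec : Claim_equal_is_victory := by
  intro board _
  unfold Spec_is_victory
  exact is_victory_eq_alt board
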